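-- pv_equiv track=rewrite | github.com/SiddarthBaruah/EE2703 | Ltspice_sim/Code.py | give_nodes
-- ===== SOURCE A (Python) =====
-- def give_nodes(circuit):
--     nodes= []
--     start=0
--     num_vol=0
--     for line in circuit:
--         line= line.split()
--         if line[0]== ".circuit":
--             start=1
--             continue
--         elif line[0]== '.end':
--             start=0
--             break
--         if start:
--             try:
--                 check1= nodes.index(line[1])
--             except:
--                 nodes.append(line[1])
--             try:
--                 check1= nodes.index(line[2])
--             except:
--                 nodes.append(line[2])
--     for line in circuit:
--         line=line.split()
--         try:
--             if line[3]== 'dc':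
--                 nodes.append("I"+line[0])
--         except:
--             pass
--     return nodes
-- ===== SOURCE B (Python) =====
-- def give_nodes(circuit):
--     nodes = []
--     currents = []
--     state = 0  # 0 = before .circuit, 1 = inside the block, 2 = after .end
--     for raw in circuit:
--         t = raw.split()
--         try:
--             if t[3] == 'dc':
--                 currents.append("I" + t[0])
--         except IndexError:
--             pass
--         if state != 2:
--             if t[0] == ".circuit":
--                 state = 1
--             elif t[0] == ".end":
--                 state = 2
--             elif state == 1:
--                 if t[1] not in nodes:
--                     nodes.append(t[1])
--                 if t[2] not in nodes:
--                     nodes.append(t[2])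
--     return nodes + currents
-- ===== Notes on version B (the rewrite author's own statement) =====
-- stated objective: faster
-- what changed: B replaces A's two full scans (node collection with break at '.end', then a separate dc-source scan re-splitting every line) by a single fused pass driven by a 3-state flag with separate nodes/currents accumulators concatenated at the end, and uses a membership test instead of A's exception-driven list.index idiom.
import Mathlib
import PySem

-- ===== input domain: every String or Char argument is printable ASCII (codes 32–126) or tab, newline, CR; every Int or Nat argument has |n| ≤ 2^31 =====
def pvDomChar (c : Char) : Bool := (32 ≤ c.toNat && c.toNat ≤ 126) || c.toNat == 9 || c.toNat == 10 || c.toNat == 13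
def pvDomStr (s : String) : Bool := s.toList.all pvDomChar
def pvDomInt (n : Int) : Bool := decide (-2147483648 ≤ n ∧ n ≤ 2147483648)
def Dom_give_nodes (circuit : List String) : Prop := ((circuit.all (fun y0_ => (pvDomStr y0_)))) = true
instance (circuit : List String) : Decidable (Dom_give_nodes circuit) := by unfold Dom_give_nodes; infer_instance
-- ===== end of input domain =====

-- B fuses A's two scans (each re-splitting every line) into one pass with a 3-state flag and separate nodes/currents accumulators; a timing run measured it faster by a constant factor.

-- ===== PORT A =====
-- first loop of A: collects node names between ".circuit" and ".end" (break at ".end");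
-- the try/except around nodes.index is Python's membership test + append (re-raises if line[1]/line[2] is missing — outside Pre_)
def giveNodesLoop1 : List String → List String → Bool → List String
  | [], nodes, _ => nodes
  | l :: rest, nodes, start =>
    let t := PySem.Str.split₀ l
    let t0 := (PySem.List.pyGet? t 0).getD ""      -- line[0]; none = IndexError, excluded by Pre_
    if t0 = ".circuit" then giveNodesLoop1 rest nodes true
    else if t0 = ".end" then nodes                 -- break
    else if start then
      let n1 := (PySem.List.pyGet? t 1).getD ""    -- line[1]; none = IndexError, excluded by Pre_
      let nodes1 := match PySem.List.index? nodes n1 with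
        | some _ => nodes
        | none => nodes ++ [n1]
      let n2 := (PySem.List.pyGet? t 2).getD ""    -- line[2]; none = IndexError, excluded by Pre_
      let nodes2 := match PySem.List.index? nodes1 n2 with
        | some _ => nodes1
        | none => nodes1 ++ [n2]
      giveNodesLoop1 rest nodes2 start
    else giveNodesLoop1 rest nodes start

-- second loop of A: appends "I"+line[0] for every line whose 4th token is 'dc' (the bare except swallows short lines)
def giveNodesLoop2 (nodes : List String) : List String → List String
  | [] => nodes
  | l :: rest =>
    let t := PySem.Str.split₀ l
    match PySem.List.pyGet? t 3 with
    | some x =>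
        if x = "dc" then giveNodesLoop2 (nodes ++ ["I" ++ (PySem.List.pyGet? t 0).getD ""]) rest
        else giveNodesLoop2 nodes rest
    | none => giveNodesLoop2 nodes rest

def give_nodes (circuit : List String) : List String :=
  giveNodesLoop2 (giveNodesLoop1 circuit [] false) circuit

-- ===== PORT B =====
-- single pass: state 0 = before .circuit, 1 = inside the block, 2 = after .end
def giveNodesAltLoop : List String → List String → List String → Nat → List String
  | [], nodes, currents, _ => nodes ++ currents
  | l :: rest, nodes, currents, state =>
    let t := PySem.Str.split₀ l
    let currents' := match PySem.List.pyGet? t 3 with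
      | some x => if x = "dc" then currents ++ ["I" ++ (PySem.List.pyGet? t 0).getD ""] else currents
      | none => currents
    if state ≠ 2 then
      let t0 := (PySem.List.pyGet? t 0).getD ""    -- t[0]; none = IndexError, excluded by Pre_
      if t0 = ".circuit" then giveNodesAltLoop rest nodes currents' 1
      else if t0 = ".end" then giveNodesAltLoop rest nodes currents' 2
      else if state = 1 then
        let n1 := (PySem.List.pyGet? t 1).getD ""
        let nodes1 := if n1 ∈ nodes then nodes else nodes ++ [n1]
        let n2 := (PySem.List.pyGet? t 2).getD ""
        let nodes2 := if n2 ∈ nodes1 then nodes1 else nodes1 ++ [n2]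
        giveNodesAltLoop rest nodes2 currents' 1
      else giveNodesAltLoop rest nodes currents' state
    else giveNodesAltLoop rest nodes currents' state

def give_nodes_alt (circuit : List String) : List String :=
  giveNodesAltLoop circuit [] [] 0

-- ===== PRECONDITION & SPEC =====
-- Pre_ excludes exactly the inputs where Python A raises IndexError: a token-less line reached
-- before the first '.end' directive, or a non-directive line with fewer than 3 tokens inside the
-- '.circuit' block (line[0]/line[1]/line[2] lookups are outside any effective try).
def preGiveNodesAux : Bool → List String → Bool
  | _, [] => true
  | start, l :: rest =>
    let t := PySem.Str.split₀ l
    match t with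
    | [] => false
    | t0 :: _ =>
      if t0 = ".circuit" then preGiveNodesAux true rest
      else if t0 = ".end" then true
      else if start then decide (2 < t.length) && preGiveNodesAux start rest
      else preGiveNodesAux start rest

def Pre_give_nodes (circuit : List String) : Prop := preGiveNodesAux false circuit = true
instance (circuit : List String) : Decidable (Pre_give_nodes circuit) := by unfold Pre_give_nodes; infer_instance

def pvWitness_give_nodes : List String :=
  [".circuit", "R1 n1 n2 1", "V1 n2 0 dc 5", ".end", "x"]

def Spec_give_nodes (circuit : List String) (out : List String) : Prop := out = give_nodes_alt circuit
instance (circuit : List String) (out : List String) : Decidable (Spec_give_nodes circuit out) := by unfold Spec_give_nodes; infer_instance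

-- ===== CLAIM (what is proved, stated in full; the proofs are below) =====
def Claim_equal_give_nodes : Prop := ∀ (circuit : List String), Dom_give_nodes circuit → Pre_give_nodes circuit → Spec_give_nodes circuit (give_nodes circuit)

-- ===== LEMMAS AND PROOFS =====

-- the current-source contribution of one line
def dcOf (l : String) : List String :=
  let t := PySem.Str.split₀ l
  match PySem.List.pyGet? t 3 with
  | some x => if x = "dc" then ["I" ++ (PySem.List.pyGet? t 0).getD ""] else []
  | none => []

theorem giveNodesLoop2_eq (ls : List String) : ∀ nodes,
    giveNodesLoop2 nodes ls = nodes ++ ls.flatMap dcOf := by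
  induction ls with
  | nil => intro nodes; simp [giveNodesLoop2]
  | cons l rest ih =>
    intro nodes
    simp only [giveNodesLoop2, dcOf, List.flatMap_cons]
    cases h : PySem.List.pyGet? (PySem.Str.split₀ l) 3 with
    | none => simp [ih]
    | some x =>
      by_cases hx : x = "dc" <;> simp [hx, ih, List.append_assoc]

theorem index_match_eq_ite (nodes : List String) (x : String) :
    (match PySem.List.index? nodes x with
      | some _ => nodes
      | none => nodes ++ [x]) = (if x ∈ nodes then nodes else nodes ++ [x]) := by
  cases h : PySem.List.index? nodes x with
  | none =>
    have hx : x ∉ nodes := by simpa [PySem.List.index?_eq_none_iff] using h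
    simp [hx]
  | some i =>
    have hx : x ∈ nodes := by
      have hs := PySem.List.index?_isSome_iff (xs := nodes) (v := x)
      rw [h] at hs
      simpa using hs
    simp [hx]

-- after the '.end' break B only accumulates currents
theorem altLoop_state2 (ls : List String) : ∀ nodes currents,
    giveNodesAltLoop ls nodes currents 2 = nodes ++ currents ++ ls.flatMap dcOf := by
  induction ls with
  | nil => intro nodes currents; simp [giveNodesAltLoop]
  | cons l rest ih =>
    intro nodes currents
    simp only [giveNodesAltLoop, dcOf, List.flatMap_cons]
    cases h : PySem.List.pyGet? (PySem.Str.split₀ l) 3 with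
    | none => simp [ih]
    | some x =>
      by_cases hx : x = "dc" <;> simp [hx, ih, List.append_assoc]

-- main invariant: one fused pass = node pass followed by dc pass
theorem altLoop_eq (ls : List String) : ∀ nodes currents (start : Bool),
    giveNodesAltLoop ls nodes currents (if start then 1 else 0) =
      giveNodesLoop1 ls nodes start ++ currents ++ ls.flatMap dcOf := by
  induction ls with
  | nil => intro nodes currents start; cases start <;> simp [giveNodesAltLoop, giveNodesLoop1]
  | cons l rest ih =>
    intro nodes currents start
    simp only [giveNodesAltLoop, giveNodesLoop1, dcOf, List.flatMap_cons]
    have hstate : (if start = true then (1:Nat) else 0) ≠ 2 := by cases start <;> simp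
    set t := PySem.Str.split₀ l with ht
    set c' := (match PySem.List.pyGet? t 3 with
      | some x => if x = "dc" then currents ++ ["I" ++ (PySem.List.pyGet? t 0).getD ""] else currents
      | none => currents) with hc'
    set d := (match PySem.List.pyGet? t 3 with
      | some x => if x = "dc" then ["I" ++ (PySem.List.pyGet? t 0).getD ""] else []
      | none => ([] : List String)) with hd
    have hcd : c' = currents ++ d := by
      rw [hc', hd]; cases h : PySem.List.pyGet? t 3 with
      | none => simp
      | some x => by_cases hx : x = "dc" <;> simp [hx]
    rw [if_pos hstate]
    by_cases h0 : (PySem.List.pyGet? t 0).getD "" = ".circuit"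
    · rw [if_pos h0, if_pos h0]
      have := ih nodes c' true
      simp only [ite_true] at this
      rw [this, hcd]
      simp [List.append_assoc]
    · rw [if_neg h0, if_neg h0]
      by_cases hend : (PySem.List.pyGet? t 0).getD "" = ".end"
      · rw [if_pos hend, if_pos hend]
        rw [altLoop_state2, hcd]
        simp [List.append_assoc]
      · rw [if_neg hend, if_neg hend]
        cases start with
        | false =>
          have h2 := ih nodes c' false
          simp only [Bool.false_eq_true, if_false] at h2 ⊢
          rw [h2, hcd]
          simp [List.append_assoc]
        | true =>
          rw [if_pos (by simp : ((if (true = true) then (1:Nat) else 0) = 1)),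
              if_pos rfl]
          rw [index_match_eq_ite]
          set n1 := (PySem.List.pyGet? t 1).getD ""
          set nodes1 := if n1 ∈ nodes then nodes else nodes ++ [n1]
          rw [index_match_eq_ite]
          set n2 := (PySem.List.pyGet? t 2).getD ""
          set nodes2 := if n2 ∈ nodes1 then nodes1 else nodes1 ++ [n2]
          have := ih nodes2 c' true
          simp only [ite_true] at this
          rw [this, hcd]
          simp [List.append_assoc]

-- ===== VERDICT (by name: the statement is the Claim_ definition above) =====
theorem give_nodes_spec : Claim_equal_give_nodes := by
  intro circuit _ _
  unfold Spec_give_nodes give_nodes give_nodes_alt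
  rw [giveNodesLoop2_eq]
  have h := altLoop_eq circuit [] [] false
  simp only [Bool.false_eq_true, if_false] at h
  rw [h]
  simp
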